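-- pv_equiv track=rewrite | github.com/bjulius/dax-bench-solver | dax-bench/benchmark_mcp_live.py | detect_dax_type
-- ===== SOURCE A (Python) =====
-- def detect_dax_type(expression, task):
--     """
--     Detect what type of DAX this is based on the expression and task.
--     Returns: 'measure', 'table', 'calc_column'
--     """
--     expr_upper = expression.upper().strip()
--
--     # Check task hints
--     task_tags = task.get("tags", [])
--     if "calculated-column" in task_tags:
--         return "calc_column"
--     if "table" in task_tags:
--         return "table"
--
--     # Table-returning functions at the start
--     table_functions = ['SUMMARIZE', 'SUMMARIZECOLUMNS', 'SELECTCOLUMNS', 'ADDCOLUMNS',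
--                        'UNION', 'INTERSECT', 'EXCEPT', 'CROSSJOIN', 'GENERATE',
--                        'GENERATEALL', 'DATATABLE', 'FILTER', 'ALL', 'VALUES',
--                        'DISTINCT', 'TOPN', 'SAMPLE', 'NATURALINNERJOIN',
--                        'NATURALLEFTOUTERJOIN', 'CALCULATETABLE']
--
--     for func in table_functions:
--         if expr_upper.startswith(func + '(') or expr_upper.startswith(func + ' ('):
--             return "table"
--
--     # Check for EARLIER which indicates calc column context
--     if 'EARLIER(' in expr_upper or 'EARLIEST(' in expr_upper:
--         return "calc_column"
--
--     return "measure"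
-- ===== SOURCE B (Python) =====
-- TABLE_FUNCS = frozenset([
--     'SUMMARIZE', 'SUMMARIZECOLUMNS', 'SELECTCOLUMNS', 'ADDCOLUMNS',
--     'UNION', 'INTERSECT', 'EXCEPT', 'CROSSJOIN', 'GENERATE',
--     'GENERATEALL', 'DATATABLE', 'FILTER', 'ALL', 'VALUES',
--     'DISTINCT', 'TOPN', 'SAMPLE', 'NATURALINNERJOIN',
--     'NATURALLEFTOUTERJOIN', 'CALCULATETABLE'])
--
--
-- def detect_dax_type(expression, task):
--     tags = task.get("tags", [])
--     if "calculated-column" in tags: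
--         return "calc_column"
--     if "table" in tags:
--         return "table"
--
--     e = expression.upper().strip()
--
--     # Lexical scan instead of prefix matching: consume the maximal run of
--     # uppercase letters (the leading identifier), allow exactly one space,
--     # then require '(' .  Correct because every table-function name is a
--     # pure A-Z word, so 'NAME(' / 'NAME (' is a prefix of e iff the scanned
--     # identifier equals NAME and the next char(s) are '(' or ' ('.
--     i = 0
--     n = len(e)
--     while i < n and 'A' <= e[i] <= 'Z':
--         i += 1
--     j = i + 1 if i < n and e[i] == ' ' else i
--     if j < n and e[j] == '(' and e[:i] in TABLE_FUNCS:
--         return "table"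
--
--     if 'EARLIER(' in e or 'EARLIEST(' in e:
--         return "calc_column"
--     return "measure"
-- ===== Notes on version B (the rewrite author's own statement) =====
-- stated objective: alternative
-- what changed: A matches the expression against 40 hand-built prefixes (name+'(' and name+' (') in a loop; B instead lexically scans the expression once (maximal run of A-Z letters, at most one space, then '(') and looks the scanned identifier up in a frozenset; this is correct because every table-function name is a pure A-Z word.
import Mathlib
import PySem

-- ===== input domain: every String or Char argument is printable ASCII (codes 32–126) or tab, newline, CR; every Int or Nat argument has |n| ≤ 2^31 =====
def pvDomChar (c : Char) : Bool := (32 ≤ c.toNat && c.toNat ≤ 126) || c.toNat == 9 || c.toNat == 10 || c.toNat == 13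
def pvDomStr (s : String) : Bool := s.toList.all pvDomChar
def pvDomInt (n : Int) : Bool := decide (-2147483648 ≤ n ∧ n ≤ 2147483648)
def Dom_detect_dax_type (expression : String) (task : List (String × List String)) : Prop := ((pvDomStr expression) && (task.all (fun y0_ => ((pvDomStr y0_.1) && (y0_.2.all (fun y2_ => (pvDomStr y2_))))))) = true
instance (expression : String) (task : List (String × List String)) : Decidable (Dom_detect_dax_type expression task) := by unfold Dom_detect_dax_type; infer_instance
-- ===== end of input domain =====

-- B replaces A's loop over 40 hand-built prefixes by one lexical scan of the
-- expression (identifier run, optional single space, '(') plus one set lookup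
-- (objective: alternative).

-- ===== PORT A =====
def pvTableFunctionsA : List String :=
  ["SUMMARIZE", "SUMMARIZECOLUMNS", "SELECTCOLUMNS", "ADDCOLUMNS",
   "UNION", "INTERSECT", "EXCEPT", "CROSSJOIN", "GENERATE",
   "GENERATEALL", "DATATABLE", "FILTER", "ALL", "VALUES",
   "DISTINCT", "TOPN", "SAMPLE", "NATURALINNERJOIN",
   "NATURALLEFTOUTERJOIN", "CALCULATETABLE"]

def detect_dax_type (expression : String) (task : List (String × List String)) : String :=
  let exprUpper := PySem.Str.strip (PySem.Str.upper expression)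
  let taskTags := PySem.Dict.getD (PySem.Dict.mk task) "tags" ([] : List String)
  if taskTags.contains "calculated-column" then "calc_column"
  else if taskTags.contains "table" then "table"
  else if pvTableFunctionsA.any (fun f =>
      PySem.Str.startswith exprUpper (f ++ "(") || PySem.Str.startswith exprUpper (f ++ " (")) then
    "table"
  else if PySem.Str.isIn "EARLIER(" exprUpper || PySem.Str.isIn "EARLIEST(" exprUpper then
    "calc_column"
  else "measure"

-- ===== PORT B =====
def pvTableSet : PySem.Set String :=
  PySem.Set.ofList
    ["SUMMARIZE", "SUMMARIZECOLUMNS", "SELECTCOLUMNS", "ADDCOLUMNS",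
     "UNION", "INTERSECT", "EXCEPT", "CROSSJOIN", "GENERATE",
     "GENERATEALL", "DATATABLE", "FILTER", "ALL", "VALUES",
     "DISTINCT", "TOPN", "SAMPLE", "NATURALINNERJOIN",
     "NATURALLEFTOUTERJOIN", "CALCULATETABLE"]

-- Source B's while loop: split off the maximal leading run of A-Z letters
def pvScanAlpha : List Char → List Char × List Char
  | [] => ([], [])
  | c :: cs =>
      if 'A' ≤ c && c ≤ 'Z' then
        let (tok, rest) := pvScanAlpha cs
        (c :: tok, rest)
      else ([], c :: cs)

def detect_dax_type_alt (expression : String) (task : List (String × List String)) : String :=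
  let tags := PySem.Dict.getD (PySem.Dict.mk task) "tags" ([] : List String)
  if tags.contains "calculated-column" then "calc_column"
  else if tags.contains "table" then "table"
  else
    let e := PySem.Str.strip (PySem.Str.upper expression)
    let (tok, rest) := pvScanAlpha e.toList
    -- Source B's index arithmetic: skip exactly one space after the identifier,
    -- then demand '(' and membership of the identifier in the set
    let hit :=
      match rest with
      | '(' :: _ => PySem.Set.contains pvTableSet (String.ofList tok)
      | ' ' :: '(' :: _ => PySem.Set.contains pvTableSet (String.ofList tok)
      | _ => false
    if hit then "table"
    else if PySem.Str.isIn "EARLIER(" e || PySem.Str.isIn "EARLIEST(" e then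
      "calc_column"
    else "measure"

-- ===== PRECONDITION & SPEC =====
def Spec_detect_dax_type (expression : String) (task : List (String × List String)) (out : String) : Prop := out = detect_dax_type_alt expression task
instance (expression : String) (task : List (String × List String)) (out : String) : Decidable (Spec_detect_dax_type expression task out) := by unfold Spec_detect_dax_type; infer_instance

-- ===== CLAIM (what is proved, stated in full; the proofs are below) =====
def Claim_equal_detect_dax_type : Prop := ∀ (expression : String) (task : List (String × List String)), Dom_detect_dax_type expression task → Spec_detect_dax_type expression task (detect_dax_type expression task)

-- ===== LEMMAS AND PROOFS =====

def pvUp (c : Char) : Bool := 'A' ≤ c && c ≤ 'Z'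

lemma scanAlpha_eq (l : List Char) :
    pvScanAlpha l = (l.takeWhile pvUp, l.dropWhile pvUp) := by
  induction l with
  | nil => rfl
  | cons c cs ih =>
      simp only [pvScanAlpha, List.takeWhile_cons, List.dropWhile_cons, ih, pvUp]
      by_cases h : ('A' ≤ c && c ≤ 'Z') = true
      · simp [h]
      · simp [h]

-- splitting at the first non-letter: a letter-word prefix followed by a
-- non-letter suffix is a prefix of cs iff the scanned token equals the word
-- and the suffix is a prefix of the remainder.
lemma prefix_span (g : List Char) (a : Char) (suf cs : List Char)
    (hg : g.all pvUp = true) (ha : pvUp a = false) :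
    (g ++ a :: suf) <+: cs ↔ cs.takeWhile pvUp = g ∧ (a :: suf) <+: cs.dropWhile pvUp := by
  constructor
  · rintro ⟨t, rfl⟩
    induction g with
    | nil => simp [List.takeWhile_cons, List.dropWhile_cons, ha]
    | cons b g ih =>
        simp only [List.all_cons, Bool.and_eq_true] at hg
        have h12 := ih hg.2
        simp only [List.cons_append, List.append_assoc] at h12 ⊢
        simp [List.takeWhile_cons, List.dropWhile_cons, hg.1, h12.1, h12.2]
  · rintro ⟨h1, h2⟩
    have hsplit : cs = cs.takeWhile pvUp ++ cs.dropWhile pvUp :=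
      (List.takeWhile_append_dropWhile).symm
    rcases h2 with ⟨t, ht⟩
    exact ⟨t, by rw [hsplit, h1, ← ht]; simp⟩

lemma names_upper : ∀ f ∈ pvTableFunctionsA, f.toList.all pvUp = true := by decide

lemma mem_pvTableSet (x : String) :
    PySem.Set.contains pvTableSet x = true ↔ x ∈ pvTableFunctionsA := by
  rw [PySem.Set.contains_iff]
  unfold pvTableSet pvTableFunctionsA
  rw [PySem.Set.mem_ofList]

-- The heart: A's 40 prefix tests equal B's scan-then-lookup, for any string.
lemma cond_eq (s : String) :
    pvTableFunctionsA.any (fun f =>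
        PySem.Str.startswith s (f ++ "(") || PySem.Str.startswith s (f ++ " (")) =
      (match s.toList.dropWhile pvUp with
       | '(' :: _ => PySem.Set.contains pvTableSet (String.ofList (s.toList.takeWhile pvUp))
       | ' ' :: '(' :: _ => PySem.Set.contains pvTableSet (String.ofList (s.toList.takeWhile pvUp))
       | _ => false) := by
  rw [Bool.eq_iff_iff]
  set cs := s.toList with hcs
  have htol1 : ∀ f : String, (f ++ "(").toList = f.toList ++ '(' :: [] := by
    intro f; simp
  have htol2 : ∀ f : String, (f ++ " (").toList = f.toList ++ ' ' :: ['('] := by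
    intro f; simp [String.toList_append]
  have hp : pvUp '(' = false := by decide
  have hs : pvUp ' ' = false := by decide
  have hall : (cs.takeWhile pvUp).all pvUp = true := List.all_takeWhile
  simp only [List.any_eq_true, Bool.or_eq_true, PySem.Str.startswith_eq,
    PySem.Chars.startswith, List.isPrefixOf_iff_prefix, htol1, htol2, ← hcs]
  constructor
  · rintro ⟨f, hf, hpre⟩
    have hup := names_upper f hf
    rcases hpre with hpre | hpre
    · rw [prefix_span f.toList '(' [] cs hup hp] at hpre
      rcases hpre with ⟨htok, ⟨t, ht⟩⟩
      rw [← ht]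
      have hmem : PySem.Set.contains pvTableSet (String.ofList (cs.takeWhile pvUp)) = true := by
        rw [mem_pvTableSet, htok]; simpa using hf
      simpa using hmem
    · rw [prefix_span f.toList ' ' ['('] cs hup hs] at hpre
      rcases hpre with ⟨htok, ⟨t, ht⟩⟩
      rw [← ht]
      have hmem : PySem.Set.contains pvTableSet (String.ofList (cs.takeWhile pvUp)) = true := by
        rw [mem_pvTableSet, htok]; simpa using hf
      simpa using hmem
  · intro h
    rcases hrest : cs.dropWhile pvUp with _ | ⟨a, rest⟩
    · rw [hrest] at h; exact absurd h (by simp)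
    · by_cases ha1 : a = '('
      · subst ha1
        rw [hrest] at h
        simp only at h
        rw [mem_pvTableSet] at h
        refine ⟨String.ofList (cs.takeWhile pvUp), h, Or.inl ?_⟩
        rw [prefix_span _ '(' [] cs (by simpa using hall) hp]
        exact ⟨by simp, ⟨rest, by simp [hrest]⟩⟩
      · by_cases ha2 : a = ' '
        · subst ha2
          rcases hrest2 : rest with _ | ⟨b, rest2⟩
          · rw [hrest, hrest2] at h; exact absurd h (by simp)
          · by_cases hb : b = '('
            · subst hb
              rw [hrest, hrest2] at h
              simp only at h
              rw [mem_pvTableSet] at h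
              refine ⟨String.ofList (cs.takeWhile pvUp), h, Or.inr ?_⟩
              rw [prefix_span _ ' ' ['('] cs (by simpa using hall) hs]
              exact ⟨by simp, ⟨rest2, by simp [hrest, hrest2]⟩⟩
            · rw [hrest, hrest2] at h
              exact absurd h (by simp [hb])
        · rw [hrest] at h
          exact absurd h (by simp [ha1, ha2])

-- ===== VERDICT (by name: the statement is the Claim_ definition above) =====
theorem detect_dax_type_spec : Claim_equal_detect_dax_type := by
  intro expression task _
  unfold Spec_detect_dax_type detect_dax_type detect_dax_type_alt
  simp only [scanAlpha_eq, cond_eq]
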